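-- pv_equiv track=rewrite | github.com/Moh-Space/30DaysOfPythonn | day_10/higher_order_function.py | country_count_by_letter
-- ===== SOURCE A (Python) =====
-- def country_count_by_letter(countries):
--     result = {}
--     for country in countries:
--         first_letter = country[0]
--         if first_letter in result:
--             result[first_letter] += 1
--         else:
--             result[first_letter] = 1
--     return result
-- ===== SOURCE B (Python) =====
-- def country_count_by_letter(countries):
--     firsts = [c[0] for c in countries]
--     order = []
--     for ch in firsts:
--         if ch not in order:
--             order.append(ch)
--     return {ch: firsts.count(ch) for ch in order}
-- ===== Notes on version B (the rewrite author's own statement) =====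
-- stated objective: alternative
-- what changed: Replaces A's scan-and-increment dict building with a two-phase pass: extract first letters, deduplicate them in first-occurrence order, then count each letter with list.count in a dict comprehension.
import Mathlib
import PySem

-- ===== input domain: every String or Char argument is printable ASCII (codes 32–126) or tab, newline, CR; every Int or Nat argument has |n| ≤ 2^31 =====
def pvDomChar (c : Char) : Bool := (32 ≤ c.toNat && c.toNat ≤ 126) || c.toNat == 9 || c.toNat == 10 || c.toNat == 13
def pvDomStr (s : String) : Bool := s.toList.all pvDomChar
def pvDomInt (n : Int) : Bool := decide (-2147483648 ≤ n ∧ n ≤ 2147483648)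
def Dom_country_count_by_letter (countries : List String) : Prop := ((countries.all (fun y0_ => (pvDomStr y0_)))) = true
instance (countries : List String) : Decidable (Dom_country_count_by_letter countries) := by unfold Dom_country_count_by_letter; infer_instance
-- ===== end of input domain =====

-- B replaces A's scan-and-increment dict building with a dedup-then-count pass (alternative decomposition, not faster).


-- ===== PORT A =====
-- `country[0]` in Python is a one-character string: `pyGet?` yields the Char (none = IndexError,
-- excluded by Pre_), wrapped back into a String with String.ofList.
def country_count_by_letter (countries : List String) : List (String × Int) :=
  (countries.foldl (fun (result : PySem.Dict String Int) country =>
      match PySem.Str.pyGet? country 0 with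
      | none => result   -- country[0] raises IndexError; such inputs are outside Pre_
      | some ch =>
        let first_letter := String.ofList [ch]
        if result.contains first_letter then
          result.insert first_letter (result.getD first_letter 0 + 1)
        else
          result.insert first_letter 1) PySem.Dict.empty).items

-- ===== PORT B =====
-- c[0] as a one-character string; the `.getD ""` arm is reached only outside Pre_ (empty string),
-- where the Python B raises IndexError.
def firstLetterB (c : String) : String :=
  ((PySem.Str.pyGet? c 0).map (fun ch => String.ofList [ch])).getD ""

def country_count_by_letter_alt (countries : List String) : List (String × Int) :=
  let firsts := countries.map firstLetterB
  (PySem.Set.ofList firsts).map (fun ch => (ch, (firsts.count ch : Int)))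

-- ===== PRECONDITION & SPEC =====
-- Pre_ excludes exactly the inputs containing an empty string, on which both A and B raise IndexError.
def Pre_country_count_by_letter (countries : List String) : Prop := ∀ s ∈ countries, s ≠ ""
instance (countries : List String) : Decidable (Pre_country_count_by_letter countries) := by unfold Pre_country_count_by_letter; infer_instance

def pvWitness_country_count_by_letter : List String := (["Finland", "Sweden", "France", "Spain"])

def Spec_country_count_by_letter (countries : List String) (out : List (String × Int)) : Prop := out = country_count_by_letter_alt countries
instance (countries : List String) (out : List (String × Int)) : Decidable (Spec_country_count_by_letter countries out) := by unfold Spec_country_count_by_letter; infer_instance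

-- ===== CLAIM (what is proved, stated in full; the proofs are below) =====
def Claim_equal_country_count_by_letter : Prop := ∀ (countries : List String), Dom_country_count_by_letter countries → Pre_country_count_by_letter countries → Spec_country_count_by_letter countries (country_count_by_letter countries)

-- ===== LEMMAS AND PROOFS =====

lemma pyGet_zero_isSome_of_ne_empty (s : String) (h : s ≠ "") :
    (PySem.Str.pyGet? s 0).isSome := by
  cases hl : s.toList with
  | nil => exact absurd (by simpa using congrArg String.ofList hl) h
  | cons c t => simp [PySem.Str.pyGet?, hl]

lemma astep_eq (d : PySem.Dict String Int) (c : String) (h : c ≠ "") :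
    (match PySem.Str.pyGet? c 0 with
     | none => d
     | some ch =>
        let first_letter := String.ofList [ch]
        if d.contains first_letter then d.insert first_letter (d.getD first_letter 0 + 1)
        else d.insert first_letter 1)
    = d.insert (firstLetterB c) (d.getD (firstLetterB c) 0 + 1) := by
  cases hl : PySem.Str.pyGet? c 0 with
  | none => exact absurd (hl ▸ pyGet_zero_isSome_of_ne_empty c h) (by simp)
  | some ch =>
    simp only [firstLetterB, hl, Option.map_some, Option.getD_some]
    by_cases hc : d.contains (String.ofList [ch]) = true
    · simp [hc]
    · simp [hc, PySem.Dict.getD_of_not_contains d 0 (by simpa using hc)]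

-- ===== VERDICT (by name: the statement is the Claim_ definition above) =====
theorem country_count_by_letter_spec : Claim_equal_country_count_by_letter := by
  intro countries _ hpre
  unfold Spec_country_count_by_letter country_count_by_letter country_count_by_letter_alt
  rw [PySem.List.foldl_congr_mem _ _
        (fun d c => d.insert (firstLetterB c) (d.getD (firstLetterB c) 0 + 1)) _
        (fun d c hc => astep_eq d c (hpre c hc))]
  show _ = (PySem.Set.ofList (countries.map firstLetterB)).map
      (fun ch => (ch, ((countries.map firstLetterB).count ch : Int)))
  rw [← List.foldl_map (f := firstLetterB)
        (g := fun (d : PySem.Dict String Int) x => d.insert x (d.getD x 0 + 1)),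
      PySem.Dict.foldl_insert_getD_add_one_eq_counter,
      PySem.Dict.items_counter]
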